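-- pv_equiv track=rewrite | github.com/wangyendt/wekws | examples/hi_xiaowen/s0/trace_wav_pipeline.py | _context_windows
-- ===== SOURCE A (Python) =====
-- from typing import Dict, List, Optional, Tuple
--
-- def _context_windows(num_frames: int, left: int, right: int) -> List[List[int]]:
--     valid_frames = max(0, num_frames - right)
--     windows: List[List[int]] = []
--     for frame_index in range(valid_frames):
--         window = []
--         for lag in range(-left, right + 1):
--             source_index = frame_index + lag
--             if source_index < 0:
--                 source_index = 0
--             elif source_index >= num_frames:
--                 source_index = num_frames - 1
--             window.append(int(source_index))
--         windows.append(window)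
--     return windows
-- ===== SOURCE B (Python) =====
-- from typing import List
--
-- def _context_windows(num_frames: int, left: int, right: int) -> List[List[int]]:
--     valid_frames = max(0, num_frames - right)
--     if valid_frames == 0:
--         return []
--     win_len = max(0, left + right + 1)
--     arr = [max(0, i - left) for i in range(valid_frames + win_len)]
--     return [arr[f:f + win_len] for f in range(valid_frames)]
-- ===== Notes on version B (the rewrite author's own statement) =====
-- stated objective: simpler
-- what changed: Replaces A's two nested per-frame clamping loops with one precomputed lower-clamped index table plus a sliding-window slice per frame (A's upper clamp is provably dead).
import Mathlib
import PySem

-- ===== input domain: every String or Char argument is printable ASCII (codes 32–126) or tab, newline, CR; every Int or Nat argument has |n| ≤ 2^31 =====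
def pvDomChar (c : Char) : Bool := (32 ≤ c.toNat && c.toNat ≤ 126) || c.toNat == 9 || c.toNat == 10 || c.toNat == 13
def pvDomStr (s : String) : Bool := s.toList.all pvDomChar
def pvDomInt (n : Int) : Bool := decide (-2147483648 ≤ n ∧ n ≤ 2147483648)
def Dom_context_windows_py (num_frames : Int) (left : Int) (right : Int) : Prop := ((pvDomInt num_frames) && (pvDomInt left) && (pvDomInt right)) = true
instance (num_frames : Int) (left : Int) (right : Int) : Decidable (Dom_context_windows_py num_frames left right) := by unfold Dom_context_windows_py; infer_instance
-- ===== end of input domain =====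

-- B replaces A's two nested clamping loops with one precomputed lower-clamped index table
-- and per-frame sliding-window slices (objective: simpler; A's upper clamp is provably dead).


-- ===== PORT A =====
def context_windows_py (num_frames : Int) (left : Int) (right : Int) : List (List Int) :=
  let valid_frames : Int := max 0 (num_frames - right)
  (PySem.List.pyRange 0 valid_frames 1).foldl (fun windows frame_index =>
    let window : List Int :=
      (PySem.List.pyRange (-left) (right + 1) 1).foldl (fun window lag =>
        let source_index := frame_index + lag
        let source_index :=
          if source_index < 0 then (0 : Int)
          else if source_index ≥ num_frames then num_frames - 1
          else source_index
        window ++ [source_index]) []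
    windows ++ [window]) []

-- ===== PORT B =====
def context_windows_py_alt (num_frames : Int) (left : Int) (right : Int) : List (List Int) :=
  let valid_frames : Int := max 0 (num_frames - right)
  if valid_frames = 0 then []
  else
  let win_len : Int := max 0 (left + right + 1)
  let arr : List Int :=
    (PySem.List.pyRange 0 (valid_frames + win_len) 1).map (fun i => max 0 (i - left))
  (PySem.List.pyRange 0 valid_frames 1).map
    (fun f => PySem.List.slice arr (some f) (some (f + win_len)))

-- ===== PRECONDITION & SPEC =====
def Spec_context_windows_py (num_frames : Int) (left : Int) (right : Int) (out : List (List Int)) : Prop := out = context_windows_py_alt num_frames left right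
instance (num_frames : Int) (left : Int) (right : Int) (out : List (List Int)) : Decidable (Spec_context_windows_py num_frames left right out) := by unfold Spec_context_windows_py; infer_instance

-- ===== CLAIM (what is proved, stated in full; the proofs are below) =====
def Claim_equal_context_windows_py : Prop := ∀ (num_frames : Int) (left : Int) (right : Int), Dom_context_windows_py num_frames left right → Spec_context_windows_py num_frames left right (context_windows_py num_frames left right)

-- ===== LEMMAS AND PROOFS =====

-- One frame: A's inner clamping loop equals B's slice of the precomputed table.
lemma context_windows_row_eq (num_frames left right f : Int)
    (h0 : 0 ≤ f) (hf : f < num_frames - right) :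
    (PySem.List.pyRange (-left) (right + 1) 1).map (fun lag =>
        let source_index := f + lag
        if source_index < 0 then (0 : Int)
        else if source_index ≥ num_frames then num_frames - 1
        else source_index)
      =
    PySem.List.slice
      ((PySem.List.pyRange 0 (max 0 (num_frames - right) + max 0 (left + right + 1)) 1).map
        (fun i => max 0 (i - left)))
      (some f) (some (f + max 0 (left + right + 1))) := by
  have hvf : max 0 (num_frames - right) = num_frames - right := by omega
  rw [PySem.List.slice_toNat _ h0 (by omega)]
  apply List.ext_getElem
  · simp only [List.length_map, List.length_take, List.length_drop,
      PySem.List.length_pyRange_one]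
    omega
  · intro j hj1 hj2
    simp only [PySem.List.length_pyRange_one, List.length_map] at hj1
    simp only [List.getElem_map, List.getElem_take, List.getElem_drop,
      PySem.List.getElem_pyRange_one]
    have hjw : j < (left + right + 1).toNat := by omega
    have hft : (f.toNat : Int) = f := Int.toNat_of_nonneg h0
    split_ifs with hneg hge
    · omega
    · omega
    · omega

-- ===== VERDICT (by name: the statement is the Claim_ definition above) =====
theorem context_windows_py_spec : Claim_equal_context_windows_py := by
  intro num_frames left right _
  unfold Spec_context_windows_py context_windows_py context_windows_py_alt
  rw [PySem.List.foldl_append_singleton_eq_map]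
  by_cases hz : max 0 (num_frames - right) = 0
  · simp [hz, PySem.List.pyRange_one_eq_nil]
  · simp only [hz, if_false]
    apply List.map_congr_left
    intro f hf
    rw [PySem.List.mem_pyRange_one] at hf
    rw [PySem.List.foldl_append_singleton_eq_map]
    exact context_windows_row_eq num_frames left right f hf.1 (by omega)
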